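-- pv_equiv track=rewrite | github.com/M-G-Sabbagh/Data-Networks | HW4-Part2/DN_HW4_2.py | LB
-- ===== SOURCE A (Python) =====
-- def LB(arrival_times, service_time):
--     """
--
--     Parameters
--     ----------
--     arrival_times :
--         A vector containing all the packet arrival times in miliseconds
--     service_time :
--         Time of service in miliseconds
--
--     Returns
--     -------
--     departure_times :
--         A vector containing the times that these packets exit the system
--
--     """
--     L = len(arrival_times)
--     departure_times = [0] * L
--     departure_times[0] = arrival_times[0]
--
--     for i in range(L - 1):
--         if arrival_times[i + 1] >= departure_times[i] + service_time:
--             departure_times[i + 1] = arrival_times[i + 1]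
--         else:
--             departure_times[i + 1] = departure_times[i] + service_time
--
--     return departure_times
-- ===== SOURCE B (Python) =====
-- def LB(arrival_times, service_time):
--     departure_times = []
--     m = None
--     for i, a in enumerate(arrival_times):
--         t = a - i * service_time
--         if m is None or t > m:
--             m = t
--         departure_times.append(m + i * service_time)
--     return departure_times
-- ===== Notes on version B (the rewrite author's own statement) =====
-- stated objective: alternative
-- what changed: Replaces the conditional carry of the previous departure (indexed writes into a preallocated list) by a single pass maintaining a running maximum of the transformed values arrival[i] - i*service, emitting departure[i] = m + i*service.
import Mathlib
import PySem

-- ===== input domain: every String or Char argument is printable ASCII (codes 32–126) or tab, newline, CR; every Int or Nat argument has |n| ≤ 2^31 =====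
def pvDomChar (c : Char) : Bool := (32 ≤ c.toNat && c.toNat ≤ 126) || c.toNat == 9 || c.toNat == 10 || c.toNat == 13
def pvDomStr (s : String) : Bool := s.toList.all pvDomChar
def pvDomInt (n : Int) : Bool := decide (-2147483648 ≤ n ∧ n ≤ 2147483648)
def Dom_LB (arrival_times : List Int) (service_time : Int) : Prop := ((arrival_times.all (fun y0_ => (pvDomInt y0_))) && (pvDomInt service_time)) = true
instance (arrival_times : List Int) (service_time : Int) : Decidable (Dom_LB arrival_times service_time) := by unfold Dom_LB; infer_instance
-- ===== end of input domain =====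

-- B replaces A's conditional carry of the previous departure (indexed writes into a
-- preallocated list) by a single pass keeping a running maximum of arrival[i] - i*service
-- (objective: alternative decomposition, same cost).

-- ===== PORT A =====
-- literal port of A: preallocated list of zeros, departure_times[0] = arrival_times[0],
-- then for i in range(L-1) an indexed read/write (indices are always in range for
-- nonempty input, so getD/set defaults are never consulted inside Pre_)
def LB (arrival_times : List Int) (service_time : Int) : List Int :=
  let L := arrival_times.length
  let departure_times := List.replicate L (0 : Int)
  let departure_times := departure_times.set 0 (arrival_times.getD 0 0)
  (List.range (L - 1)).foldl
    (fun dep i =>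
      if arrival_times.getD (i + 1) 0 ≥ dep.getD i 0 + service_time then
        dep.set (i + 1) (arrival_times.getD (i + 1) 0)
      else
        dep.set (i + 1) (dep.getD i 0 + service_time))
    departure_times

-- ===== PORT B =====
-- literal port of B: fold over enumerate(arrival_times) carrying (m : Option Int, out)
def LB_alt (arrival_times : List Int) (service_time : Int) : List Int :=
  ((PySem.List.enumerate arrival_times 0).foldl
    (fun (st : Option Int × List Int) p =>
      let t := p.2 - p.1 * service_time
      let m : Int := match st.1 with
        | none => t
        | some m0 => if t > m0 then t else m0
      (some m, st.2 ++ [m + p.1 * service_time]))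
    (none, [])).2

-- ===== PRECONDITION & SPEC =====
-- A writes departure_times[0] unconditionally, so it raises IndexError on the empty list.
def Pre_LB (arrival_times : List Int) (service_time : Int) : Prop := arrival_times ≠ []
instance (arrival_times : List Int) (service_time : Int) : Decidable (Pre_LB arrival_times service_time) := by unfold Pre_LB; infer_instance
def pvWitness_LB : List Int × Int := ([3, 4, 10], 2)

def Spec_LB (arrival_times : List Int) (service_time : Int) (out : List Int) : Prop := out = LB_alt arrival_times service_time
instance (arrival_times : List Int) (service_time : Int) (out : List Int) : Decidable (Spec_LB arrival_times service_time out) := by unfold Spec_LB; infer_instance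

-- ===== CLAIM (what is proved, stated in full; the proofs are below) =====
def Claim_equal_LB : Prop := ∀ (arrival_times : List Int) (service_time : Int), Dom_LB arrival_times service_time → Pre_LB arrival_times service_time → Spec_LB arrival_times service_time (LB arrival_times service_time)

-- ===== LEMMAS AND PROOFS =====

-- reference chain: departure d of the previous packet, remaining arrivals
def chain (s d : Int) : List Int → List Int
  | [] => []
  | a :: rest =>
      let d' := if a ≥ d + s then a else d + s
      d' :: chain s d' rest

theorem getD_mid (l₁ l₂ : List Int) (x : Int) : (l₁ ++ x :: l₂).getD l₁.length 0 = x := by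
  simp [List.getD]

theorem set_mid (l₁ l₂ : List Int) (x y : Int) : (l₁ ++ x :: l₂).set l₁.length y = l₁ ++ y :: l₂ := by
  simp

-- A's loop, generalized: departures computed so far are done ++ [d], rest are the remaining arrivals
theorem loopA (s : Int) (arr : List Int) :
    ∀ (rest done : List Int) (d : Int),
      arr.drop (done.length + 1) = rest →
      (List.range' done.length rest.length).foldl
        (fun dep i =>
          if arr.getD (i + 1) 0 ≥ dep.getD i 0 + s then
            dep.set (i + 1) (arr.getD (i + 1) 0)
          else
            dep.set (i + 1) (dep.getD i 0 + s))
        ((done ++ [d]) ++ List.replicate rest.length (0 : Int))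
      = (done ++ [d]) ++ chain s d rest := by
  intro rest
  induction rest with
  | nil => intro done d _; simp [chain]
  | cons b rest' ih =>
    intro done d hdrop
    have hb : arr.getD (done.length + 1) 0 = b := by
      have : arr[done.length + 1]? = some b := by
        have h2 : (arr.drop (done.length + 1))[0]? = arr[done.length + 1 + 0]? :=
          List.getElem?_drop
        rw [hdrop] at h2; simpa using h2.symm
      simp [List.getD, this]
    have hdrop' : arr.drop ((done ++ [d]).length + 1) = rest' := by
      have h3 : arr.drop (done.length + 1 + 1) = (arr.drop (done.length + 1)).drop 1 := by
        rw [List.drop_drop]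
      simp only [List.length_append, List.length_cons, List.length_nil, Nat.zero_add]
      rw [h3, hdrop]; simp
    have hread : ((done ++ [d]) ++ (0 :: List.replicate rest'.length (0:Int))).getD done.length 0 = d := by
      have := getD_mid done (0 :: List.replicate rest'.length (0:Int)) d
      simpa using this
    have hset : ∀ v : Int, ((done ++ [d]) ++ (0 :: List.replicate rest'.length (0:Int))).set (done.length + 1) v
        = ((done ++ [d]) ++ [v]) ++ List.replicate rest'.length (0:Int) := by
      intro v
      have := set_mid (done ++ [d]) (List.replicate rest'.length (0:Int)) 0 v
      simpa using this
    have hlen : (done ++ [d]).length = done.length + 1 := by simp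
    rw [List.length_cons, List.replicate_succ, List.range'_succ, List.foldl_cons]
    by_cases hc : b ≥ d + s
    · rw [if_pos (by rw [hb, hread]; exact hc), hb, hset]
      have := ih (done ++ [d]) b hdrop'
      rw [hlen] at this; rw [this]
      simp [chain, hc]
    · rw [if_neg (by rw [hb, hread]; exact hc), hread, hset]
      have := ih (done ++ [d]) (d + s) hdrop'
      rw [hlen] at this; rw [this]
      simp [chain, hc]

theorem LB_chain (s : Int) (a : Int) (t : List Int) :
    LB (a :: t) s = a :: chain s a t := by
  have h0 : (List.replicate (a :: t).length (0:Int)).set 0 ((a :: t).getD 0 0)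
      = ([] ++ [a]) ++ List.replicate t.length (0:Int) := by
    simp [List.replicate_succ, List.getD]
  have := loopA s (a :: t) t [] a (by simp)
  simp only [LB, h0]
  simpa [List.range_eq_range'] using this

-- B's loop, generalized: m is the running max, out the departures so far
theorem loopB (s : Int) :
    ∀ (rest : List Int) (k m : Int) (out : List Int),
      ((PySem.List.enumerate rest (k + 1)).foldl
        (fun (st : Option Int × List Int) p =>
          let t := p.2 - p.1 * s
          let m : Int := match st.1 with
            | none => t
            | some m0 => if t > m0 then t else m0
          (some m, st.2 ++ [m + p.1 * s]))
        (some m, out)).2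
      = out ++ chain s (m + k * s) rest := by
  intro rest
  induction rest with
  | nil => intro k m out; simp [PySem.List.enumerate_nil, chain]
  | cons b rest' ih =>
    intro k m out
    rw [PySem.List.enumerate_cons, List.foldl_cons]
    have hmul : (k + 1) * s = k * s + s := by ring
    by_cases hc : b - (k + 1) * s > m
    · simp only [if_pos hc]
      have := ih (k + 1) (b - (k + 1) * s) (out ++ [b - (k + 1) * s + (k + 1) * s])
      rw [this]
      have hd : b - (k + 1) * s + (k + 1) * s = b := by ring
      have hge : b ≥ m + k * s + s := by rw [hmul] at hc; linarith
      simp only [chain, hd]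
      rw [if_pos (by linarith [hge])]
      simp
    · simp only [if_neg hc]
      have := ih (k + 1) m (out ++ [m + (k + 1) * s])
      rw [this]
      rw [not_lt] at hc
      by_cases he : b ≥ m + k * s + s
      · have hb : b = m + (k + 1) * s := by rw [hmul] at hc ⊢; omega
        simp only [chain]
        rw [if_pos he, hb, hmul]
        simp
      · simp only [chain]
        rw [if_neg he, hmul]
        simp [add_assoc]

theorem LB_alt_chain (s : Int) (a : Int) (t : List Int) :
    LB_alt (a :: t) s = a :: chain s a t := by
  have h := loopB s t 0 a [a]
  simp only [LB_alt, PySem.List.enumerate_cons]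
  rw [List.foldl_cons]
  simp only [zero_mul, sub_zero, add_zero, zero_add]
  simpa using h

-- ===== VERDICT (by name: the statement is the Claim_ definition above) =====
theorem LB_spec : Claim_equal_LB := by
  intro arr s _ hpre
  unfold Spec_LB
  cases arr with
  | nil => exact absurd rfl hpre
  | cons a t => rw [LB_chain, LB_alt_chain]
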